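-- pv_equiv track=rewrite | github.com/MinhHung7/xAI_Educational_QA_System | test_clean_dataset.py | convert_fol_syntax
-- ===== SOURCE A (Python) =====
-- def convert_fol_syntax(expr):
--     expr = expr.replace("->", "→")
--     expr = expr.replace("'", "")
--     expr = expr.replace("implies", "→")
--     expr = expr.replace("not ", "¬")
--     expr = expr.replace("~", "¬")
--     expr = expr.replace("&", "∧")
--     expr = expr.replace("|", "∨")
--     expr = expr.replace("<=", "≤")
--     expr = expr.replace(">=", "≥")
--     expr = expr.replace("Hà", "Ha")
--     expr = expr.replace("GPA4.0", "GPA4")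
--     expr = expr.replace("FORALL", "ForAll")
--     expr = expr.replace("EXISTS", "Exists")
--     expr = expr.replace(" in ", " ∈ ")
--
--     quantifier_map = {
--         'ForAll': '∀',
--         'Exists': '∃'
--     }
--
--     result = ''
--     while expr.startswith('ForAll') or expr.startswith('Exists'):
--         # Lấy loại định lượng và kí hiệu
--         if expr.startswith('ForAll'):
--             quant = 'ForAll'
--         else:
--             quant = 'Exists'
--         symbol = quantifier_map[quant]
--
--         # Tìm vị trí mở và đóng ngoặc ngoài cùng đầu tiên
--         start = expr.find('(')
--         count = 1
--         i = start + 1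
--         while i < len(expr):
--             if expr[i] == '(':
--                 count += 1
--             elif expr[i] == ')':
--                 count -= 1
--                 if count == 0:
--                     break
--             i += 1
--
--         # Lấy phần nội dung bên trong ForAll(...)
--         inside = expr[start + 1:i]
--         # Tách phần biến và phần biểu thức
--         comma_index = inside.find(',')
--         var_part = inside[:comma_index].strip()
--         expr = inside[comma_index + 1:].strip()  # cập nhật expr cho vòng lặp tiếp theo
--
--         # Nối các biến với kí hiệu định lượng
--         variables = [v.strip() for v in var_part.split(',')]
--         result += ''.join([symbol + v for v in variables])
--
--         # Cập nhật expr từ ngoài dấu ngoặc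
--         expr = expr.strip()
--         if expr.startswith('(') and expr.endswith(')'):
--             expr = expr[1:-1].strip()
--
--     return result + f'({expr})'
-- ===== SOURCE B (Python) =====
-- def convert_fol_syntax(expr):
--     expr = expr.replace("->", "→")
--     expr = expr.replace("'", "")
--     expr = expr.replace("implies", "→")
--     expr = expr.replace("not ", "¬")
--     expr = expr.replace("~", "¬")
--     expr = expr.replace("&", "∧")
--     expr = expr.replace("|", "∨")
--     expr = expr.replace("<=", "≤")
--     expr = expr.replace(">=", "≥")
--     expr = expr.replace("Hà", "Ha")
--     expr = expr.replace("GPA4.0", "GPA4")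
--     expr = expr.replace("FORALL", "ForAll")
--     expr = expr.replace("EXISTS", "Exists")
--     expr = expr.replace(" in ", " ∈ ")
--     return _peel(expr)
--
--
-- def _matched_paren_end(e, i):
--     # paren-counting scan: index of the ')' closing depth 1, or len(e) if none
--     count = 1
--     while i < len(e):
--         if e[i] == '(':
--             count += 1
--         elif e[i] == ')':
--             count -= 1
--             if count == 0:
--                 break
--         i += 1
--     return i
--
--
-- def _peel(e):
--     if not (e.startswith('ForAll') or e.startswith('Exists')):
--         return '(' + e + ')'
--     symbol = '∀' if e.startswith('ForAll') else '∃'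
--     start = e.find('(')
--     i = _matched_paren_end(e, start + 1)
--     inside = e[start + 1:i]
--     ci = inside.find(',')
--     var_part = inside[:ci].strip()
--     rest = inside[ci + 1:].strip()
--     if rest.startswith('(') and rest.endswith(')'):
--         rest = rest[1:-1].strip()
--     return symbol + var_part + _peel(rest)
-- ===== Notes on version B (the rewrite author's own statement) =====
-- stated objective: alternative
-- what changed: The while loop with a growing result accumulator is replaced by a recursive helper peel that peels one quantifier per call and builds the output right-to-left by concatenation; the always-singleton split-on-comma/join of the variable part is dropped and the redundant double strip removed.
import Mathlib
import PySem

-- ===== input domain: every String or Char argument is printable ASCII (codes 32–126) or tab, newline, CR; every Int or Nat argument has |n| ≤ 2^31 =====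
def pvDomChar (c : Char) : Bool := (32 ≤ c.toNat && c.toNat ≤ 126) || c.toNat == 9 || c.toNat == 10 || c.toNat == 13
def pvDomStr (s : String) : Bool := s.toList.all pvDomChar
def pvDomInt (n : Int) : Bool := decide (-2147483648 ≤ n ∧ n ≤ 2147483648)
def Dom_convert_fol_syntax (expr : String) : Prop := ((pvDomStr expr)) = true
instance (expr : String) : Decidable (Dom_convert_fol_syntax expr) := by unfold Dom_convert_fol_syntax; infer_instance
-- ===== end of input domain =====

-- B replaces A's while loop + result accumulator by a recursive peel that emits one quantifier
-- per call and concatenates right-to-left, dropping the always-singleton split/join (objective: alternative).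

-- ===== PORT A =====
-- the initial replace chain (identical in Source A and Source B)
def pvNormalize (expr : String) : List Char :=
  let e := expr.toList
  let e := PySem.Chars.replace e "->".toList "→".toList
  let e := PySem.Chars.replace e "'".toList "".toList
  let e := PySem.Chars.replace e "implies".toList "→".toList
  let e := PySem.Chars.replace e "not ".toList "¬".toList
  let e := PySem.Chars.replace e "~".toList "¬".toList
  let e := PySem.Chars.replace e "&".toList "∧".toList
  let e := PySem.Chars.replace e "|".toList "∨".toList
  let e := PySem.Chars.replace e "<=".toList "≤".toList
  let e := PySem.Chars.replace e ">=".toList "≥".toList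
  let e := PySem.Chars.replace e "Hà".toList "Ha".toList
  let e := PySem.Chars.replace e "GPA4.0".toList "GPA4".toList
  let e := PySem.Chars.replace e "FORALL".toList "ForAll".toList
  let e := PySem.Chars.replace e "EXISTS".toList "Exists".toList
  let e := PySem.Chars.replace e " in ".toList " ∈ ".toList
  e

-- the inner while loop 'count/i' scan (identical in Source A and in Source B's _matched_paren_end)
def pvMatchEnd (e : List Char) (count : Int) (i : Nat) : Nat :=
  if h : i < e.length then
    if e[i] = '(' then pvMatchEnd e (count + 1) (i + 1)
    else if e[i] = ')' then
      (if count - 1 = 0 then i else pvMatchEnd e (count - 1) (i + 1))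
    else pvMatchEnd e count (i + 1)
  else i
termination_by e.length - i

def pvQuantMap : PySem.Dict (List Char) (List Char) :=
  PySem.Dict.mk [("ForAll".toList, "∀".toList), ("Exists".toList, "∃".toList)]

-- the body of A's outer while loop: one iteration, from (result, expr) to (result, expr)
def pvStepA (result e : List Char) : List Char × List Char :=
  let quant := if PySem.Chars.startswith e "ForAll".toList then "ForAll".toList else "Exists".toList
  let symbol := pvQuantMap.getD quant []
  let start := PySem.Chars.find e "(".toList
  let i := pvMatchEnd e 1 (start + 1).toNat
  let inside := PySem.List.slice e (some (start + 1)) (some (i : Int))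
  let commaIndex := PySem.Chars.find inside ",".toList
  let varPart := PySem.Chars.strip (PySem.List.slice inside none (some commaIndex))
  let e1 := PySem.Chars.strip (PySem.List.slice inside (some (commaIndex + 1)) none)
  let vars := (PySem.Chars.splitOn varPart ",".toList).map PySem.Chars.strip
  let result := result ++ (vars.map (fun v => symbol ++ v)).flatten
  let e2 := PySem.Chars.strip e1
  let e3 := if PySem.Chars.startswith e2 "(".toList && PySem.Chars.endswith e2 ")".toList
            then PySem.Chars.strip (PySem.List.slice e2 (some 1) (some (-1))) else e2
  (result, e3)

-- A's outer while loop; fuel only makes it total (each iteration strictly shrinks expr except at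
-- the fixpoint state where the Python loops forever, so |e|+1 fuel is never exhausted when A returns)
def pvLoopA (fuel : Nat) (result : List Char) (e : List Char) : List Char × List Char :=
  match fuel with
  | 0 => (result, e)
  | fuel + 1 =>
    if PySem.Chars.startswith e "ForAll".toList || PySem.Chars.startswith e "Exists".toList then
      let p := pvStepA result e
      pvLoopA fuel p.1 p.2
    else (result, e)

def convert_fol_syntax (expr : String) : String :=
  let e := pvNormalize expr
  let p := pvLoopA (e.length + 1) [] e
  String.ofList (p.1 ++ ('(' :: (p.2 ++ [')'])))

-- ===== PORT B =====
-- Source B's _peel, with the same totalising fuel as A's loop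
def pvPeelB (fuel : Nat) (e : List Char) : List Char :=
  match fuel with
  | 0 => '(' :: (e ++ [')'])
  | fuel + 1 =>
    if PySem.Chars.startswith e "ForAll".toList || PySem.Chars.startswith e "Exists".toList then
      let symbol := if PySem.Chars.startswith e "ForAll".toList then "∀".toList else "∃".toList
      let start := PySem.Chars.find e "(".toList
      let i := pvMatchEnd e 1 (start + 1).toNat
      let inside := PySem.List.slice e (some (start + 1)) (some (i : Int))
      let commaIndex := PySem.Chars.find inside ",".toList
      let varPart := PySem.Chars.strip (PySem.List.slice inside none (some commaIndex))
      let rest := PySem.Chars.strip (PySem.List.slice inside (some (commaIndex + 1)) none)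
      let rest := if PySem.Chars.startswith rest "(".toList && PySem.Chars.endswith rest ")".toList
                  then PySem.Chars.strip (PySem.List.slice rest (some 1) (some (-1))) else rest
      symbol ++ varPart ++ pvPeelB fuel rest
    else '(' :: (e ++ [')'])

def convert_fol_syntax_alt (expr : String) : String :=
  let e := pvNormalize expr
  String.ofList (pvPeelB (e.length + 1) e)

-- ===== PRECONDITION & SPEC =====
def Spec_convert_fol_syntax (expr : String) (out : String) : Prop := out = convert_fol_syntax_alt expr
instance (expr : String) (out : String) : Decidable (Spec_convert_fol_syntax expr out) := by
  unfold Spec_convert_fol_syntax; infer_instance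

-- ===== CLAIM (what is proved, stated in full; the proofs are below) =====
def Claim_equal_convert_fol_syntax : Prop := ∀ (expr : String), Dom_convert_fol_syntax expr → Spec_convert_fol_syntax expr (convert_fol_syntax expr)

-- ===== LEMMAS AND PROOFS =====

-- proof-level abbreviations for the shared per-iteration computation
def pvCond (e : List Char) : Bool :=
  PySem.Chars.startswith e "ForAll".toList || PySem.Chars.startswith e "Exists".toList

def pvSym (e : List Char) : List Char :=
  if PySem.Chars.startswith e "ForAll".toList then "∀".toList else "∃".toList

def pvInside (e : List Char) : List Char :=
  PySem.List.slice e (some (PySem.Chars.find e "(".toList + 1))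
    (some ((pvMatchEnd e 1 (PySem.Chars.find e "(".toList + 1).toNat : Nat) : Int))

def pvVar (e : List Char) : List Char :=
  PySem.Chars.strip (PySem.List.slice (pvInside e) none (some (PySem.Chars.find (pvInside e) ",".toList)))

def pvRest (e : List Char) : List Char :=
  let rest := PySem.Chars.strip
    (PySem.List.slice (pvInside e) (some (PySem.Chars.find (pvInside e) ",".toList + 1)) none)
  if PySem.Chars.startswith rest "(".toList && PySem.Chars.endswith rest ")".toList
  then PySem.Chars.strip (PySem.List.slice rest (some 1) (some (-1))) else rest

theorem rstrip_rstrip (l : List Char) :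
    PySem.Chars.rstrip (PySem.Chars.rstrip l) = PySem.Chars.rstrip l := by
  simp [PySem.Chars.rstrip, List.dropWhile_idempotent]

theorem rstrip_prefix (t : List Char) : PySem.Chars.rstrip t <+: t := by
  have h := List.dropWhile_suffix (l := t.reverse) (p := PySem.Chars.isspace)
  rw [PySem.Chars.rstrip]
  rw [← List.reverse_reverse t]
  exact List.reverse_prefix.mpr (by simpa using h)

theorem lstrip_rstrip_lstrip (l : List Char) :
    PySem.Chars.lstrip (PySem.Chars.rstrip (PySem.Chars.lstrip l)) =
      PySem.Chars.rstrip (PySem.Chars.lstrip l) := by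
  set t := PySem.Chars.lstrip l with ht
  have hpre := rstrip_prefix t
  rw [PySem.Chars.lstrip, List.dropWhile_eq_self_iff]
  intro hl
  have hlt : 0 < t.length := lt_of_lt_of_le hl hpre.length_le
  have h0 : (PySem.Chars.rstrip t)[0] = t[0] := hpre.getElem hl
  rw [h0]
  have h2 : List.dropWhile PySem.Chars.isspace t = t := by
    rw [ht, PySem.Chars.lstrip, List.dropWhile_idempotent]
  rw [List.dropWhile_eq_self_iff] at h2
  exact h2 _

theorem strip_idem (l : List Char) :
    PySem.Chars.strip (PySem.Chars.strip l) = PySem.Chars.strip l := by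
  simp [PySem.Chars.strip, lstrip_rstrip_lstrip, rstrip_rstrip]

theorem mem_strip {x : Char} {l : List Char} (h : x ∈ PySem.Chars.strip l) : x ∈ l := by
  simp only [PySem.Chars.strip, PySem.Chars.rstrip, PySem.Chars.lstrip, List.mem_reverse] at h
  exact (List.dropWhile_sublist _).mem ((List.mem_reverse).1 ((List.dropWhile_sublist _).mem h))

theorem splitOn_go_single (c : Char) : ∀ (fuel : Nat) (l cur : List Char) (acc : List (List Char)),
    c ∉ l → PySem.Chars.splitOn.go [c] fuel l cur acc = ((cur.reverse ++ l) :: acc).reverse := by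
  intro fuel
  induction fuel with
  | zero => intro l cur acc h; rw [PySem.Chars.splitOn.go]
  | succ f ih =>
    intro l cur acc h
    cases l with
    | nil =>
      rw [PySem.Chars.splitOn.go]
      all_goals simp
    | cons x rest =>
      rw [PySem.Chars.splitOn.go]
      have hx : ([c].isPrefixOf (x :: rest)) = false := by
        simp [List.isPrefixOf]
        intro hcx; exact absurd (hcx ▸ List.mem_cons_self) h
      rw [hx]
      simp only [Bool.false_eq_true, if_false]
      rw [ih rest (x :: cur) acc (fun hm => h (List.mem_cons_of_mem _ hm))]
      simp

theorem splitOn_single {c : Char} {l : List Char} (h : c ∉ l) :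
    PySem.Chars.splitOn l [c] = [l] := by
  rw [PySem.Chars.splitOn, splitOn_go_single c _ _ _ _ h]
  simp

theorem not_mem_before_find (c : Char) (l : List Char) :
    c ∉ PySem.List.slice l none (some (PySem.Chars.find l [c])) := by
  by_cases h : 0 ≤ PySem.Chars.find l [c]
  · rw [PySem.List.slice_to l h]
    intro hm
    obtain ⟨i, hi, hgi⟩ := List.getElem_of_mem hm
    have hil : i < l.length := lt_of_lt_of_le hi (by simp)
    have hik : i < (PySem.Chars.find l [c]).toNat := lt_of_lt_of_le hi (by simp)
    apply (PySem.Chars.find_spec h).2 i hik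
    rw [List.drop_eq_getElem_cons hil]
    have hc : l[i] = c := by simpa using hgi
    simp [hc]
  · have hneg : PySem.Chars.find l [c] = -1 := by
      have := PySem.Chars.neg_one_le_find l [c]; omega
    have hcl : c ∉ l := fun hm =>
      ((PySem.Chars.find_eq_neg_one_iff l [c]).1 hneg) ((List.singleton_infix_iff c l).mpr hm)
    rw [hneg, PySem.List.slice_to_neg_one]
    intro hm; exact hcl ((List.dropLast_sublist l).mem hm)

theorem varpart_no_comma (I : List Char) :
    ',' ∉ PySem.Chars.strip (PySem.List.slice I none (some (PySem.Chars.find I ",".toList))) :=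
  fun h => not_mem_before_find ',' I (mem_strip h)

theorem splitOn_comma_single {l : List Char} (h : ',' ∉ l) :
    PySem.Chars.splitOn l ",".toList = [l] := splitOn_single h

theorem getD_quant (b : Bool) :
    pvQuantMap.getD (if b = true then "ForAll".toList else "Exists".toList) [] =
      (if b = true then "∀".toList else "∃".toList) := by
  cases b <;> rfl

theorem stepA_eq (res e : List Char) : pvStepA res e = (res ++ (pvSym e ++ pvVar e), pvRest e) := by
  unfold pvStepA pvSym pvVar pvRest pvInside
  simp only []
  generalize (PySem.List.slice e (some (PySem.Chars.find e "(".toList + 1))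
      (some ((pvMatchEnd e 1 (PySem.Chars.find e "(".toList + 1).toNat : Nat) : Int)) : List Char) = I
  rw [splitOn_comma_single (varpart_no_comma I)]
  simp only [strip_idem, List.map_cons, List.map_nil, List.flatten_cons, List.flatten_nil,
    List.append_nil, getD_quant]

theorem peelB_succ (n : Nat) (e : List Char) :
    pvPeelB (n + 1) e =
      if pvCond e then pvSym e ++ pvVar e ++ pvPeelB n (pvRest e) else '(' :: (e ++ [')']) := by
  rfl

theorem loopA_succ (n : Nat) (res e : List Char) :
    pvLoopA (n + 1) res e =
      if pvCond e then pvLoopA n (res ++ (pvSym e ++ pvVar e)) (pvRest e) else (res, e) := by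
  rw [pvLoopA]
  by_cases hc : (PySem.Chars.startswith e "ForAll".toList ||
      PySem.Chars.startswith e "Exists".toList) = true
  · rw [if_pos hc, if_pos (show pvCond e = true from hc), stepA_eq]
  · rw [if_neg hc, if_neg (show ¬ pvCond e = true from hc)]

theorem pv_loop_eq_peel (fuel : Nat) : ∀ (res e : List Char),
    (pvLoopA fuel res e).1 ++ ('(' :: ((pvLoopA fuel res e).2 ++ [')'])) =
      res ++ pvPeelB fuel e := by
  induction fuel with
  | zero => intro res e; rfl
  | succ n ih =>
    intro res e
    rw [loopA_succ, peelB_succ]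
    cases hc : pvCond e
    · simp
    · simpa [List.append_assoc] using ih (res ++ (pvSym e ++ pvVar e)) (pvRest e)

theorem convert_fol_syntax_spec : Claim_equal_convert_fol_syntax := by
  intro expr _
  show convert_fol_syntax expr = convert_fol_syntax_alt expr
  have h := pv_loop_eq_peel ((pvNormalize expr).length + 1) [] (pvNormalize expr)
  rw [List.nil_append] at h
  exact congrArg String.ofList h
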